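-- pv_equiv track=rewrite | github.com/MiguelZN/PDFsummary-in-Python-MZ | PDFsummary.py | getArticleName
-- ===== SOURCE A (Python) =====
-- def getArticleName(inputtedname):
--     articlename = ""
--     for letter in inputtedname:
--         if letter == "/":
--             articlename = ""
--         else:
--             articlename = articlename+letter
--
--     return articlename
-- ===== SOURCE B (Python) =====
-- def getArticleName(inputtedname):
--     return inputtedname[inputtedname.rfind('/') + 1:]
-- ===== Notes on version B (the rewrite author's own statement) =====
-- stated objective: faster
-- what changed: Replaces the forward accumulate-and-reset character loop (quadratic repeated string concatenation) with a single rfind for the last slash followed by one slice.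
import Mathlib
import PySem

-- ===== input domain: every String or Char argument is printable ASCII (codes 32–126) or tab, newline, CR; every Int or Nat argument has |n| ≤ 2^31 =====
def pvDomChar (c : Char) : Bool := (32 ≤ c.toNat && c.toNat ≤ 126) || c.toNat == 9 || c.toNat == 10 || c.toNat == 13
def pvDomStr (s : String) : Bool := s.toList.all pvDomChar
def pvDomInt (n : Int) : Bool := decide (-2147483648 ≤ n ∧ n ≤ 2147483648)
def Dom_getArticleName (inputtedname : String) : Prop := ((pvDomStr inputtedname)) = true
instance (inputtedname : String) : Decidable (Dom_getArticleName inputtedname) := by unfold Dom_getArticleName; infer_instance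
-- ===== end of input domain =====

-- B replaces A's forward accumulate-and-reset loop with rfind('/') + one slice (idiomatic).


-- ===== PORT A =====
-- for letter in inputtedname: reset on '/', otherwise append
def getArticleName (inputtedname : String) : String :=
  String.ofList
    (inputtedname.toList.foldl
      (fun articlename letter => if letter = '/' then [] else articlename ++ [letter]) [])

-- ===== PORT B =====
-- inputtedname[inputtedname.rfind('/') + 1:]
def getArticleName_alt (inputtedname : String) : String :=
  PySem.Str.slice inputtedname (some (PySem.Str.rfind inputtedname "/" + 1)) none

-- ===== PRECONDITION & SPEC =====
def Spec_getArticleName (inputtedname : String) (out : String) : Prop := out = getArticleName_alt inputtedname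
instance (inputtedname : String) (out : String) : Decidable (Spec_getArticleName inputtedname out) := by unfold Spec_getArticleName; infer_instance

-- ===== CLAIM (what is proved, stated in full; the proofs are below) =====
def Claim_equal_getArticleName : Prop := ∀ (inputtedname : String), Dom_getArticleName inputtedname → Spec_getArticleName inputtedname (getArticleName inputtedname)

-- ===== LEMMAS AND PROOFS =====

-- one-step unfolding equations for PySem.Chars.rfind.go
theorem pv_go_zero (s sub : List Char) :
    PySem.Chars.rfind.go s sub 0 = if sub.isPrefixOf s then 0 else -1 := by
  unfold PySem.Chars.rfind.go; rfl

theorem pv_go_succ (s sub : List Char) (j : Nat) :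
    PySem.Chars.rfind.go s sub (j + 1) =
      if sub.isPrefixOf (List.drop (j + 1) s) then ((j : Int) + 1)
      else PySem.Chars.rfind.go s sub j := by
  cases j <;> rfl

theorem pv_prefix_single (c : Char) : (['/'].isPrefixOf [c]) = ('/' == c) := by
  simp [List.isPrefixOf]

theorem pv_prefix_nil : (['/'].isPrefixOf ([] : List Char)) = false := by
  simp [List.isPrefixOf]

-- go is bounded above by its counter
theorem pv_go_le (l : List Char) (x : Nat) : PySem.Chars.rfind.go l ['/'] x ≤ (x : Int) := by
  induction x with
  | zero => rw [pv_go_zero]; split <;> simp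
  | succ j ih =>
      rw [pv_go_succ]
      split
      · simp
      · exact le_trans ih (by exact_mod_cast Nat.le_succ j)

-- go is at least -1
theorem pv_go_ge (l : List Char) (x : Nat) : -1 ≤ PySem.Chars.rfind.go l ['/'] x := by
  induction x with
  | zero => rw [pv_go_zero]; split <;> omega
  | succ j ih =>
      rw [pv_go_succ]
      split
      · omega
      · exact ih

-- below the appended character, go does not see it
theorem pv_go_append (l : List Char) (c : Char) (j : Nat) (hj : j < l.length) :
    PySem.Chars.rfind.go (l ++ [c]) ['/'] j = PySem.Chars.rfind.go l ['/'] j := by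
  induction j with
  | zero =>
      rw [pv_go_zero, pv_go_zero]
      cases l with
      | nil => simp at hj
      | cons h t => simp [List.isPrefixOf]
  | succ j ih =>
      rw [pv_go_succ, pv_go_succ]
      have hdrop : List.drop (j + 1) (l ++ [c]) = List.drop (j + 1) l ++ [c] :=
        List.drop_append_of_le_length (by omega)
      have hne : List.drop (j + 1) l ≠ [] := by
        simp [List.drop_eq_nil_iff]; omega
      obtain ⟨h, t, ht⟩ := List.exists_cons_of_ne_nil hne
      rw [hdrop, ht]
      simp only [List.cons_append, List.isPrefixOf]
      rw [ih (by omega)]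
      rfl


-- rfind of '/' never points past the end
theorem pv_rfind_lt (l : List Char) :
    PySem.Chars.rfind l ['/'] < (l.length : Int) := by
  unfold PySem.Chars.rfind
  cases hl : l.length with
  | zero =>
      have : l = [] := List.eq_nil_of_length_eq_zero hl
      subst this
      rw [pv_go_zero, pv_prefix_nil]
      simp
  | succ m =>
      rw [pv_go_succ]
      have hd : List.drop (m + 1) l = [] := by
        apply List.drop_eq_nil_of_le; omega
      rw [hd, pv_prefix_nil]
      simp only [Bool.false_eq_true, if_false]
      have := pv_go_le l m
      omega

-- key step: rfind on l ++ [c]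
theorem pv_rfind_append (l : List Char) (c : Char) :
    PySem.Chars.rfind (l ++ [c]) ['/'] =
      if c = '/' then (l.length : Int) else PySem.Chars.rfind l ['/'] := by
  unfold PySem.Chars.rfind
  simp only [List.length_append, List.length_cons, List.length_nil, Nat.zero_add]
  rw [pv_go_succ]
  have h1 : List.drop (l.length + 1) (l ++ [c]) = [] := by
    apply List.drop_eq_nil_of_le; simp
  rw [h1, pv_prefix_nil]
  simp only [Bool.false_eq_true, if_false]
  cases hl : l.length with
  | zero =>
      have hnil : l = [] := List.eq_nil_of_length_eq_zero hl
      subst hnil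
      simp only [List.nil_append]
      rw [pv_go_zero, pv_go_zero, pv_prefix_single, pv_prefix_nil]
      by_cases hc : c = '/'
      · simp [hc]
      · have hpc : ('/' == c) = false := beq_eq_false_iff_ne.mpr (Ne.symm hc)
        simp [hpc, hc]
  | succ m =>
      rw [pv_go_succ]
      have hdrop : List.drop (m + 1) (l ++ [c]) = [c] := by
        rw [List.drop_append_of_le_length (by omega)]
        rw [List.drop_eq_nil_of_le (by omega)]
        simp
      rw [hdrop, pv_prefix_single]
      by_cases hc : c = '/'
      · simp [hc]
      · have hpc : ('/' == c) = false := beq_eq_false_iff_ne.mpr (Ne.symm hc)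
        rw [hpc]
        simp only [Bool.false_eq_true, if_false, if_neg hc]
        rw [pv_go_append l c m (by omega), pv_go_succ]
        have h2 : List.drop (m + 1) l = [] := by
          apply List.drop_eq_nil_of_le; omega
        rw [h2, pv_prefix_nil]
        simp

-- the loop of A computes the suffix after the last '/'
theorem pv_main (l : List Char) :
    l.foldl (fun articlename letter => if letter = '/' then [] else articlename ++ [letter]) [] =
      List.drop (PySem.Chars.rfind l ['/'] + 1).toNat l := by
  induction l using List.reverseRecOn with
  | nil => simp [PySem.Chars.rfind, pv_go_zero]
  | append_singleton l c ih =>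
      rw [List.foldl_append, pv_rfind_append]
      by_cases hc : c = '/'
      · simp only [List.foldl_cons, List.foldl_nil]
        rw [if_pos hc, if_pos hc]
        rw [show ((l.length : Int) + 1).toNat = l.length + 1 by omega]
        rw [List.drop_eq_nil_of_le (by simp)]
      · simp only [List.foldl_cons, List.foldl_nil, if_neg hc]
        rw [ih]
        have hlt := pv_rfind_lt l
        have hge : -1 ≤ PySem.Chars.rfind l ['/'] := pv_go_ge l l.length
        rw [List.drop_append_of_le_length (by omega)]

-- ===== VERDICT (by name: the statement is the Claim_ definition above) =====
theorem getArticleName_spec : Claim_equal_getArticleName := by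
  intro s _
  unfold Spec_getArticleName getArticleName getArticleName_alt
  rw [PySem.Str.rfind_eq]
  unfold PySem.Str.slice
  congr 1
  have hge : -1 ≤ PySem.Chars.rfind s.toList ['/'] := pv_go_ge s.toList s.toList.length
  have hnn : 0 ≤ PySem.Chars.rfind s.toList ['/'] + 1 := by omega
  rw [show ("/" : String).toList = ['/'] from rfl]
  unfold PySem.Chars.slice
  rw [PySem.List.slice_from _ hnn]
  exact pv_main s.toList
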